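-- pv_equiv track=rewrite | github.com/ros-navigation/navigation2 | launch/launch/launch/launch_introspector.py | tree_like_indent
-- ===== SOURCE A (Python) =====
-- from typing import List
-- from typing import Text
--
-- def tree_like_indent(lines: List[Text]) -> List[Text]:
--     """Replace whitespace with "tree"-like indentation symbols."""
--     result = []
--     previous_first_non_whitespace = None
--     for old_line in lines:
--         if not old_line.startswith('    '):
--             continue
--         line = str(old_line)
--         line = '│' + line[1:]
--         first_non_whitespace = len(old_line) - len(old_line.lstrip())
--         if previous_first_non_whitespace is not None and '└' in result[-1]:
--             if previous_first_non_whitespace <= first_non_whitespace: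
--                 result[-1] = result[-1].replace('└', '├', 1)
--         previous_first_non_whitespace = first_non_whitespace
--         line = line[0:first_non_whitespace - 4] + '└── ' + line[first_non_whitespace:]
--         result.append(line)
--     if result[-1].startswith('│'):
--         result[-1] = ' ' + result[-1][1:]
--     # TODO(wjwwood): figure out how to handle remaining cases like how to fix this sample:
--     # ├── OnProcessExit(...)
--     # │   └── Action(...)
--     # ├── OnProcessExit(...)
--     #     └── Action(...)
--     # ^ this dangling stub
--     return result
-- ===== SOURCE B (Python) =====
-- from typing import List
-- from typing import Text
--
--
-- def tree_like_indent(lines: List[Text]) -> List[Text]: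
--     """Replace whitespace with "tree"-like indentation symbols."""
--     # Pass 1: materialize the transformed survivors together with their indent.
--     work = []
--     for old_line in lines:
--         if old_line.startswith('    '):
--             fnw = len(old_line) - len(old_line.lstrip())
--             t = '│' + old_line[1:]
--             work.append((t[0:fnw - 4] + '└── ' + t[fnw:], fnw))
--     # Pass 2: adjacent pairs decide the '└' -> '├' fixup of the left entry.
--     out = []
--     for (t1, f1), (_, f2) in zip(work, work[1:]):
--         out.append(t1.replace('└', '├', 1) if f1 <= f2 else t1)
--     last = work[-1][0]  # IndexError propagates when nothing survived, as intended
--     out.append(' ' + last[1:] if last.startswith('│') else last)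
--     return out
-- ===== Notes on version B (the rewrite author's own statement) =====
-- stated objective: alternative
-- what changed: A's single stateful loop (previous-indent variable, '└'-membership test and in-place rewriting of result[-1] while appending) is replaced by two passes: materialize the (transformed line, indent) survivors once, then decide each '└'→'├' fixup from adjacent pairs of that list and apply the final '│'→' ' fixup to the last entry when emitting it.
import Mathlib
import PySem

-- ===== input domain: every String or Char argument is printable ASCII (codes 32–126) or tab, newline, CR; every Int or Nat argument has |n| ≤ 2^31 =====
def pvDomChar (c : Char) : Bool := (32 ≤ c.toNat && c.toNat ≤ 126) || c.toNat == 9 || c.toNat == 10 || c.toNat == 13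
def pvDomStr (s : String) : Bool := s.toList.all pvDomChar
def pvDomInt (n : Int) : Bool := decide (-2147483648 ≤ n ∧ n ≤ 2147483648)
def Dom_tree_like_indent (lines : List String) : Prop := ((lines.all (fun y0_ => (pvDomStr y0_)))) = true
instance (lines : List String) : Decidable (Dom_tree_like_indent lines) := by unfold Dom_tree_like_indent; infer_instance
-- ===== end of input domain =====

-- B replaces A's single stateful loop (previous-indent variable plus in-place rewriting of
-- result[-1]) by two passes: materialize the (transformed line, indent) survivors, then fix
-- adjacent pairs and the final entry; same return value, different decomposition.

-- shared hand port of Python's  s.replace('└', '├', 1)  (PySem.Chars.replace has no count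
-- argument): exact because old and new are single characters, so replacing the first
-- occurrence is replacing the first matching character.
def pyReplaceFirstChar (a b : Char) : List Char → List Char
  | [] => []
  | c :: rest => if c = a then b :: rest else c :: pyReplaceFirstChar a b rest

-- ===== PORT A =====
-- one iteration of A's loop; state = (result, previous_first_non_whitespace)
def treeStepA (st : List (List Char) × Option Int) (oldLine : List Char) :
    List (List Char) × Option Int :=
  if PySem.Chars.startswith oldLine [' ', ' ', ' ', ' '] then
    let line1 : List Char := '│' :: PySem.List.slice oldLine (some 1) none
    let fnw : Int := (oldLine.length : Int) - ((PySem.Chars.lstrip oldLine).length : Int)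
    let result :=
      match st.2 with
      | none => st.1
      | some prev =>
        if PySem.Chars.isIn ['└'] (PySem.List.pyGetD st.1 (-1) []) then
          if prev ≤ fnw then
            PySem.List.pySetD st.1 (-1)
              (pyReplaceFirstChar '└' '├' (PySem.List.pyGetD st.1 (-1) []))
          else st.1
        else st.1
    let line2 := PySem.List.slice line1 (some 0) (some (fnw - 4)) ++
      ['└', '─', '─', ' '] ++ PySem.List.slice line1 (some fnw) none
    (result ++ [line2], some fnw)
  else st

def tree_like_indent (lines : List String) : List String :=
  let st := (lines.map (·.toList)).foldl treeStepA ([], none)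
  match st.1.getLast? with
  | none => []  -- Python raises IndexError at result[-1] here; excluded by Pre_
  | some last =>
    let result :=
      if PySem.Chars.startswith last ['│'] then
        PySem.List.pySetD st.1 (-1) (' ' :: PySem.List.slice last (some 1) none)
      else st.1
    result.map (fun cs => String.ofList cs)

-- ===== PORT B =====
-- pass 1: transformed survivors with their indents
def altWork (lines : List (List Char)) : List (List Char × Int) :=
  lines.filterMap (fun old =>
    if PySem.Chars.startswith old [' ', ' ', ' ', ' '] then
      let fnw : Int := (old.length : Int) - ((PySem.Chars.lstrip old).length : Int)
      let t : List Char := '│' :: PySem.List.slice old (some 1) none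
      some (PySem.List.slice t (some 0) (some (fnw - 4)) ++ ['└', '─', '─', ' '] ++
        PySem.List.slice t (some fnw) none, fnw)
    else none)

-- pass 2 over adjacent pairs; the base case is Source B's final work[-1] fixup
-- (Source B raises IndexError on empty work; the [] case is excluded by Pre_)
def altPass2 : List (List Char × Int) → List (List Char)
  | [] => []
  | [(t, _)] => [if PySem.Chars.startswith t ['│'] then ' ' :: PySem.List.slice t (some 1) none else t]
  | (t1, f1) :: (t2, f2) :: rest =>
    (if f1 ≤ f2 then pyReplaceFirstChar '└' '├' t1 else t1) :: altPass2 ((t2, f2) :: rest)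

def tree_like_indent_alt (lines : List String) : List String :=
  (altPass2 (altWork (lines.map (·.toList)))).map (fun cs => String.ofList cs)

-- ===== PRECONDITION & SPEC =====
-- Pre_ excludes exactly the inputs with no line starting with four spaces: there the Python A
-- (and B) raises IndexError at result[-1].
def Pre_tree_like_indent (lines : List String) : Prop :=
  (lines.any (fun s => PySem.Str.startswith s "    ")) = true
instance (lines : List String) : Decidable (Pre_tree_like_indent lines) := by
  unfold Pre_tree_like_indent; infer_instance

def pvWitness_tree_like_indent : List String := ["    a", "        b", "    c"]

def Spec_tree_like_indent (lines : List String) (out : List String) : Prop :=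
  out = tree_like_indent_alt lines
instance (lines : List String) (out : List String) : Decidable (Spec_tree_like_indent lines out) := by
  unfold Spec_tree_like_indent; infer_instance

-- ===== CLAIM (what is proved, stated in full; the proofs are below) =====
def Claim_equal_tree_like_indent : Prop := ∀ (lines : List String), Dom_tree_like_indent lines → Pre_tree_like_indent lines → Spec_tree_like_indent lines (tree_like_indent lines)

-- ===== LEMMAS AND PROOFS =====

-- proof-side helpers: the raw pass-2 chain (no last-line fixup) and the last-line fixup
def pass2raw : (List Char × Int) → List (List Char × Int) → List (List Char)
  | p, [] => [p.1]
  | p, q :: qs =>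
    (if p.2 ≤ q.2 then pyReplaceFirstChar '└' '├' p.1 else p.1) :: pass2raw q qs

def fixLastLine (t : List Char) : List Char :=
  if PySem.Chars.startswith t ['│'] then ' ' :: PySem.List.slice t (some 1) none else t

theorem pySetD_append_singleton (xs : List (List Char)) (x v : List Char) :
    PySem.List.pySetD (xs ++ [x]) (-1) v = xs ++ [v] := by
  simp [PySem.List.pySetD, PySem.List.pySet?, PySem.List.pyIdx?]

theorem stub_isIn (pre suf : List Char) :
    PySem.Chars.isIn ['└'] (pre ++ ['└', '─', '─', ' '] ++ suf) = true := by
  rw [PySem.Chars.isIn_iff_infix]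
  exact ⟨pre, ['─', '─', ' '] ++ suf, by simp⟩

-- A's loop, once a first survivor is pending, produces exactly the raw pass-2 chain of B
theorem loopA_eq (rest : List (List Char)) :
    ∀ (acc : List (List Char)) (t0 : List Char) (f0 : Int),
      PySem.Chars.isIn ['└'] t0 = true →
      (rest.foldl treeStepA (acc ++ [t0], some f0)).1 =
        acc ++ pass2raw (t0, f0) (altWork rest) := by
  induction rest with
  | nil => intro acc t0 f0 _; simp [pass2raw, altWork]
  | cons old rest ih =>
    intro acc t0 f0 h0
    by_cases hs : PySem.Chars.startswith old [' ', ' ', ' ', ' '] = true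
    · have hstep : treeStepA (acc ++ [t0], some f0) old =
        ((acc ++ [if f0 ≤ ((old.length : Int) - ((PySem.Chars.lstrip old).length : Int)) then
            pyReplaceFirstChar '└' '├' t0 else t0]) ++
          [PySem.List.slice ('│' :: PySem.List.slice old (some 1) none) (some 0)
              (some (((old.length : Int) - ((PySem.Chars.lstrip old).length : Int)) - 4)) ++
            ['└', '─', '─', ' '] ++
            PySem.List.slice ('│' :: PySem.List.slice old (some 1) none)
              (some ((old.length : Int) - ((PySem.Chars.lstrip old).length : Int))) none],
         some ((old.length : Int) - ((PySem.Chars.lstrip old).length : Int))) := by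
        simp only [treeStepA, hs, if_true, PySem.List.pyGetD_neg_one_append_singleton, h0]
        split_ifs with hle <;> simp [pySetD_append_singleton]
      simp only [List.foldl_cons, hstep, altWork, List.filterMap_cons, hs, if_true]
      rw [ih _ _ _ (stub_isIn _ _)]
      simp only [pass2raw, altWork, List.append_assoc, List.cons_append, List.nil_append]
    · simp only [Bool.not_eq_true] at hs
      simp only [List.foldl_cons, treeStepA, hs, Bool.false_eq_true, if_false, altWork,
        List.filterMap_cons]
      exact ih acc t0 f0 h0

-- B's pass 2 is the raw chain with the last line fixed up
theorem altPass2_split (ps : List (List Char × Int)) :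
    ∀ p, ∃ ys y, pass2raw p ps = ys ++ [y] ∧ altPass2 (p :: ps) = ys ++ [fixLastLine y] := by
  induction ps with
  | nil =>
    intro p
    exact ⟨[], p.1, by simp [pass2raw], by simp [altPass2, fixLastLine]⟩
  | cons q qs ih =>
    intro p
    obtain ⟨ys, y, h1, h2⟩ := ih q
    refine ⟨(if p.2 ≤ q.2 then pyReplaceFirstChar '└' '├' p.1 else p.1) :: ys, y, ?_, ?_⟩
    · simp [pass2raw, h1]
    · simp [altPass2, h2]

theorem core_eq (ls : List (List Char))
    (hpre : (ls.any (fun l => PySem.Chars.startswith l [' ', ' ', ' ', ' '])) = true) :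
    (match (ls.foldl treeStepA ([], none)).1.getLast? with
      | none => ([] : List String)
      | some last =>
        (if PySem.Chars.startswith last ['│'] then
            PySem.List.pySetD (ls.foldl treeStepA ([], none)).1 (-1)
              (' ' :: PySem.List.slice last (some 1) none)
          else (ls.foldl treeStepA ([], none)).1).map (fun cs => String.ofList cs)) =
    (altPass2 (altWork ls)).map (fun cs => String.ofList cs) := by
  induction ls with
  | nil => simp at hpre
  | cons old ls ih =>
    by_cases hs : PySem.Chars.startswith old [' ', ' ', ' ', ' '] = true
    · set F : Int := (old.length : Int) - ((PySem.Chars.lstrip old).length : Int) with hF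
      set T : List Char :=
        PySem.List.slice ('│' :: PySem.List.slice old (some 1) none) (some 0) (some (F - 4)) ++
          ['└', '─', '─', ' '] ++
          PySem.List.slice ('│' :: PySem.List.slice old (some 1) none) (some F) none with hT
      have hin : PySem.Chars.isIn ['└'] T = true := by rw [hT]; exact stub_isIn _ _
      have hstep : treeStepA ([], none) old = ([T], some F) := by
        simp [treeStepA, hs, hT, hF]
      have hfold : (ls.foldl treeStepA (treeStepA ([], none) old)).1 =
          pass2raw (T, F) (altWork ls) := by
        rw [hstep]
        have h0 := loopA_eq ls [] T F hin
        simpa using h0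
      obtain ⟨ys, y, h1, h2⟩ := altPass2_split (altWork ls) (T, F)
      have haw : altWork (old :: ls) = (T, F) :: altWork ls := by
        simp [altWork, hs, hT, hF]
      simp only [List.foldl_cons, hfold, h1, List.getLast?_concat, haw, h2]
      unfold fixLastLine
      split_ifs with hy
      · rw [pySetD_append_singleton]
      · rfl
    · simp only [Bool.not_eq_true] at hs
      have hpre' : (ls.any (fun l => PySem.Chars.startswith l [' ', ' ', ' ', ' '])) = true := by
        simpa [hs] using hpre
      have haw : altWork (old :: ls) = altWork ls := by simp [altWork, hs]
      simp only [List.foldl_cons, treeStepA, hs, Bool.false_eq_true, if_false, haw]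
      exact ih hpre'

-- ===== VERDICT (by name: the statement is the Claim_ definition above) =====
theorem tree_like_indent_spec : Claim_equal_tree_like_indent := by
  intro lines _ hpre
  unfold Spec_tree_like_indent tree_like_indent tree_like_indent_alt
  have hpre' : ((lines.map (·.toList)).any
      (fun l => PySem.Chars.startswith l [' ', ' ', ' ', ' '])) = true := by
    unfold Pre_tree_like_indent at hpre
    simpa [List.any_map, Function.comp] using hpre
  exact core_eq (lines.map (·.toList)) hpre'
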